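-- pv_equiv track=rewrite | github.com/kazumisawa/genome-infomation-analysis | chapter04/kmerDistance.py | kmerDistance
-- ===== SOURCE A (Python) =====
-- def kmerDistance(data1, data2):
--     result = 0
--     pair = data1.keys() | data2.keys() #union
--     for i in pair:
--         c1, c2 = 0,0
--         if i in data1.keys():
--             c1 = data1[i]
--         if i in data2.keys():
--             c2 = data2[i]
--         result += abs( c1 - c2 )
--     return result
-- ===== SOURCE B (Python) =====
-- def kmerDistance(data1, data2):
--     # Sort both k-mer tables by key, then do a linear two-pointer merge:
--     # matching keys contribute |c1 - c2|, unmatched keys contribute |c|.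
--     xs = sorted(data1.items(), key=lambda p: p[0])
--     ys = sorted(data2.items(), key=lambda p: p[0])
--     i, j, total = 0, 0, 0
--     while i < len(xs) and j < len(ys):
--         (k1, c1), (k2, c2) = xs[i], ys[j]
--         if k1 == k2:
--             total += abs(c1 - c2)
--             i += 1
--             j += 1
--         elif k1 < k2:
--             total += abs(c1)
--             i += 1
--         else:
--             total += abs(c2)
--             j += 1
--     for _, c in xs[i:]:
--         total += abs(c)
--     for _, c in ys[j:]:
--         total += abs(c)
--     return total
-- ===== Notes on version B (the rewrite author's own statement) =====
-- stated objective: alternative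
-- what changed: Replaces A's union-of-key-sets pass with per-key dict lookups by a sort-and-merge algorithm: both item lists are sorted by key and a two-pointer merge accumulates |c1-c2| on matching keys and |c| on unmatched ones, with no key-set union and no dictionary lookups.
import Mathlib
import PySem

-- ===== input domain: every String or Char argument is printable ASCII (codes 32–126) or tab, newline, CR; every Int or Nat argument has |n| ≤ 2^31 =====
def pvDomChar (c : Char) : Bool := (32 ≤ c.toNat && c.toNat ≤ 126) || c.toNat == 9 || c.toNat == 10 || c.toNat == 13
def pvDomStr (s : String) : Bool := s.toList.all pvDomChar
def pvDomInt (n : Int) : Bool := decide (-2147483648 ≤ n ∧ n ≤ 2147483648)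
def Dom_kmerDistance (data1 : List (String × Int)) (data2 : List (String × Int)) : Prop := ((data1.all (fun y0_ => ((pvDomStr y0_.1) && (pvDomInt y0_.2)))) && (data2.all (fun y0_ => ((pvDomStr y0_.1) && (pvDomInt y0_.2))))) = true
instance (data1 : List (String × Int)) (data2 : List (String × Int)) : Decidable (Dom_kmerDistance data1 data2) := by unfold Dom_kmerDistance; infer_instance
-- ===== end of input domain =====

-- B replaces A's union-of-key-sets pass (per-key dict lookups) by sort-and-merge:
-- both item lists are sorted by key and a two-pointer merge accumulates the distance.


-- ===== PORT A =====
-- Python iterates the union set in hash order; the sum is order-independent, so the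
-- port iterates it in first-insertion order (PySem.Set).
def kmerDistance (data1 : List (String × Int)) (data2 : List (String × Int)) : Int :=
  let d1 := PySem.Dict.ofList data1
  let d2 := PySem.Dict.ofList data2
  let pair := PySem.Set.union (PySem.Set.ofList d1.keys) d2.keys
  pair.foldl (fun result i =>
    let c1 : Int := if d1.contains i then d1.getD i 0 else 0
    let c2 : Int := if d2.contains i then d2.getD i 0 else 0
    result + |c1 - c2|) 0

-- ===== PORT B =====
-- the two trailing for-loops of Source B: add |c| for every remaining item
def kmerTail (l : List (String × Int)) (total : Int) : Int :=
  l.foldl (fun t p => t + |p.2|) total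

-- the two-pointer while loop of Source B (pointers become structural recursion)
def kmerMerge : List (String × Int) → List (String × Int) → Int → Int
  | [], ys, total => kmerTail ys total
  | xs, [], total => kmerTail xs total
  | x :: xs, y :: ys, total =>
    if x.1 = y.1 then kmerMerge xs ys (total + |x.2 - y.2|)
    else if x.1 < y.1 then kmerMerge xs (y :: ys) (total + |x.2|)
    else kmerMerge (x :: xs) ys (total + |y.2|)
termination_by xs ys _ => xs.length + ys.length

def kmerDistance_alt (data1 : List (String × Int)) (data2 : List (String × Int)) : Int :=
  let xs := PySem.List.sorted (PySem.Dict.ofList data1).items (fun p => p.1)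
  let ys := PySem.List.sorted (PySem.Dict.ofList data2).items (fun p => p.1)
  kmerMerge xs ys 0

-- ===== PRECONDITION & SPEC =====
def Spec_kmerDistance (data1 : List (String × Int)) (data2 : List (String × Int)) (out : Int) : Prop := out = kmerDistance_alt data1 data2
instance (data1 : List (String × Int)) (data2 : List (String × Int)) (out : Int) : Decidable (Spec_kmerDistance data1 data2 out) := by unfold Spec_kmerDistance; infer_instance

-- ===== CLAIM (what is proved, stated in full; the proofs are below) =====
def Claim_equal_kmerDistance : Prop := ∀ (data1 : List (String × Int)) (data2 : List (String × Int)), Dom_kmerDistance data1 data2 → Spec_kmerDistance data1 data2 (kmerDistance data1 data2)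

-- ===== LEMMAS AND PROOFS =====

-- first-match lookup (with default 0) in a raw association list
def lk (l : List (String × Int)) (k : String) : Int := (PySem.Dict.mk l).getD k 0

-- the common canonical value both programs compute
def kmerVal (d1 d2 : PySem.Dict String Int) : Int :=
  (d1.items.map (fun p => |p.2 - d2.getD p.1 0|)).sum
    + ((d2.items.filter (fun p => !(d1.contains p.1))).map (fun p => |p.2|)).sum

-- Set.update of a nodup list appends exactly the elements not already present.
lemma update_nodup {α : Type} [BEq α] [LawfulBEq α] (s xs : List α) (hx : xs.Nodup) :
    PySem.Set.update s xs = s ++ xs.filter (fun x => !(decide (x ∈ s))) := by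
  induction xs generalizing s with
  | nil => simp [PySem.Set.update]
  | cons x t ih =>
    rcases List.nodup_cons.mp hx with ⟨hxt, ht⟩
    simp only [PySem.Set.update, List.foldl_cons, PySem.Set.add, PySem.Set.contains]
    by_cases hm : x ∈ s
    · rw [if_pos (by simpa using hm)]
      rw [show List.foldl PySem.Set.add s t = PySem.Set.update s t from rfl, ih s ht]
      simp [hm]
    · rw [if_neg (by simpa using hm)]
      rw [show List.foldl PySem.Set.add (s ++ [x]) t = PySem.Set.update (s ++ [x]) t from rfl,
        ih (s ++ [x]) ht]
      have hfe : t.filter (fun y => !(decide (y ∈ s ++ [x]))) = t.filter (fun y => !(decide (y ∈ s))) := by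
        apply List.filter_congr
        intro y hy
        have : y ≠ x := fun h => hxt (h ▸ hy)
        simp [List.mem_append, this]
      rw [hfe]
      simp [hm]

-- A computes the canonical value.
lemma A_char (data1 data2 : List (String × Int)) :
    kmerDistance data1 data2 = kmerVal (PySem.Dict.ofList data1) (PySem.Dict.ofList data2) := by
  unfold kmerDistance kmerVal
  simp only []
  set d1 := PySem.Dict.ofList data1 with hd1
  set d2 := PySem.Dict.ofList data2 with hd2
  have h1n : d1.keys.Nodup := PySem.Dict.nodup_keys_ofList data1
  have h2n : d2.keys.Nodup := PySem.Dict.nodup_keys_ofList data2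
  have hofl : PySem.Set.ofList d1.keys = d1.keys := by
    have := update_nodup ([] : List String) d1.keys h1n
    simpa [PySem.Set.ofList, PySem.Set.update, PySem.Set.empty] using this
  have hU : PySem.Set.union (PySem.Set.ofList d1.keys) d2.keys
      = d1.keys ++ d2.keys.filter (fun k => !(decide (k ∈ d1.keys))) := by
    rw [PySem.Set.union, hofl, update_nodup d1.keys d2.keys h2n]
  rw [hU]
  rw [List.foldl_append, PySem.List.foldl_add, PySem.List.foldl_add]
  have hk1 : d1.keys = d1.items.map Prod.fst := rfl
  have hk2 : d2.keys = d2.items.map Prod.fst := rfl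
  have hpart1 :
      (d1.keys.map (fun i => |(if d1.contains i then d1.getD i 0 else 0) -
          (if d2.contains i then d2.getD i 0 else 0)|))
        = d1.items.map (fun p => |p.2 - d2.getD p.1 0|) := by
    rw [hk1, List.map_map]
    apply List.map_congr_left
    intro p hp
    have hc1 : d1.contains p.1 = true := by
      rw [PySem.Dict.contains_eq_decide_mem_keys]
      simp only [decide_eq_true_eq]
      exact hk1 ▸ List.mem_map.mpr ⟨p, hp, rfl⟩
    have hg1 : d1.getD p.1 0 = p.2 := by
      have := PySem.Dict.get?_of_mem_items d1 (k := p.1) (v := p.2) (by simpa using hp) h1n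
      simp [PySem.Dict.getD, this]
    have hc2 : (if d2.contains p.1 then d2.getD p.1 0 else 0) = d2.getD p.1 0 := by
      cases h : d2.contains p.1
      · simp [PySem.Dict.getD_of_not_contains d2 0 h]
      · simp
    simp [Function.comp, hc1, hg1, hc2]
  have hpart2 :
      ((d2.keys.filter (fun k => !(decide (k ∈ d1.keys)))).map
          (fun i => |(if d1.contains i then d1.getD i 0 else 0) -
            (if d2.contains i then d2.getD i 0 else 0)|))
        = ((d2.items.filter (fun p => !(d1.contains p.1))).map (fun p => |p.2|)) := by
    have hpred : d2.items.filter (fun p => !(decide (p.1 ∈ d1.keys)))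
        = d2.items.filter (fun p => !(d1.contains p.1)) := by
      apply List.filter_congr
      intro p _
      rw [PySem.Dict.contains_eq_decide_mem_keys]
    rw [hk2, List.filter_map, List.map_map]
    rw [show ((fun k => !(decide (k ∈ d1.keys))) ∘ Prod.fst)
        = (fun p : String × Int => !(decide (p.1 ∈ d1.keys))) from rfl, hpred]
    apply List.map_congr_left
    intro p hp
    rcases List.mem_filter.mp hp with ⟨hpm, hpc⟩
    have hc1 : d1.contains p.1 = false := by simpa using hpc
    have hc2 : d2.contains p.1 = true := by
      rw [PySem.Dict.contains_eq_decide_mem_keys]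
      simp only [decide_eq_true_eq]
      exact hk2 ▸ List.mem_map.mpr ⟨p, hpm, rfl⟩
    have hg2 : d2.getD p.1 0 = p.2 := by
      have := PySem.Dict.get?_of_mem_items d2 (k := p.1) (v := p.2) (by simpa using hpm) h2n
      simp [PySem.Dict.getD, this]
    simp [Function.comp, hc1, hc2, hg2]
  rw [hpart1, hpart2]
  ring

lemma kmerTail_eq (l : List (String × Int)) (t : Int) :
    kmerTail l t = t + (l.map (fun p => |p.2|)).sum := PySem.List.foldl_add l _ t

lemma lk_cons (y : String × Int) (l : List (String × Int)) (k : String) :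
    lk (y :: l) k = if y.1 = k then y.2 else lk l k := by
  obtain ⟨a, b⟩ := y
  simp only [lk, PySem.Dict.getD_eq_get?_getD, PySem.Dict.get?_mk_cons]
  by_cases h : a = k <;> simp [h]

lemma lk_nil (k : String) : lk [] k = 0 := rfl

lemma lk_not_mem (l : List (String × Int)) (k : String) (h : k ∉ l.map Prod.fst) : lk l k = 0 := by
  induction l with
  | nil => rfl
  | cons y l ih =>
    simp only [List.map_cons, List.mem_cons, not_or] at h
    rw [lk_cons, if_neg (fun he => h.1 he.symm)]
    exact ih h.2

-- the merge loop computes: Σ over xs of |c1 - lookup ys| plus Σ over ys-keys absent from xs of |c2|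
lemma merge_char : ∀ (xs ys : List (String × Int)) (total : Int),
    (xs.map Prod.fst).Pairwise (· < ·) → (ys.map Prod.fst).Pairwise (· < ·) →
    kmerMerge xs ys total
      = total + (xs.map (fun p => |p.2 - lk ys p.1|)).sum
        + ((ys.filter (fun p => !(decide (p.1 ∈ xs.map Prod.fst)))).map (fun p => |p.2|)).sum := by
  intro xs
  induction xs with
  | nil =>
    intro ys total _ _
    simp [kmerMerge, kmerTail_eq]
  | cons x xs ihx =>
    intro ys
    induction ys with
    | nil =>
      intro total _ _
      simp [kmerMerge, kmerTail_eq, lk_nil]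
    | cons y ys ihy =>
      intro total hx hy
      rw [List.map_cons] at hx hy
      obtain ⟨hxhd, hx'⟩ := List.pairwise_cons.mp hx
      obtain ⟨hyhd, hy'⟩ := List.pairwise_cons.mp hy
      by_cases heq : x.1 = y.1
      · rw [show kmerMerge (x :: xs) (y :: ys) total = kmerMerge xs ys (total + |x.2 - y.2|) by
          rw [kmerMerge]; simp [heq]]
        rw [ihx ys (total + |x.2 - y.2|) hx' hy']
        have h1 : lk (y :: ys) x.1 = y.2 := by rw [lk_cons, if_pos heq.symm]
        have h2 : xs.map (fun p => |p.2 - lk (y :: ys) p.1|) = xs.map (fun p => |p.2 - lk ys p.1|) := by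
          apply List.map_congr_left
          intro p hp
          have hk : p.1 ≠ y.1 := by
            have := hxhd p.1 (List.mem_map.mpr ⟨p, hp, rfl⟩)
            exact fun he => absurd (heq ▸ he ▸ this) (lt_irrefl _)
          rw [lk_cons, if_neg (fun he => hk he.symm)]
        have h3 : (y :: ys).filter (fun p => !(decide (p.1 ∈ (x :: xs).map Prod.fst)))
            = ys.filter (fun p => !(decide (p.1 ∈ xs.map Prod.fst))) := by
          rw [List.filter_cons]
          rw [if_neg (by simp; intro h; exact absurd heq.symm h)]
          apply List.filter_congr
          intro p hp
          have hk : p.1 ≠ x.1 := by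
            have := hyhd p.1 (List.mem_map.mpr ⟨p, hp, rfl⟩)
            exact fun he => absurd (heq ▸ he ▸ this) (lt_irrefl _)
          simp [List.map_cons, hk]
        rw [h3, List.map_cons, h1, h2]
        simp
        ring
      · by_cases hlt : x.1 < y.1
        · rw [show kmerMerge (x :: xs) (y :: ys) total = kmerMerge xs (y :: ys) (total + |x.2|) by
            rw [kmerMerge]; simp [heq, hlt]]
          rw [ihx (y :: ys) (total + |x.2|) hx' hy]
          have h1 : lk (y :: ys) x.1 = 0 := by
            apply lk_not_mem
            rw [List.map_cons]
            intro hm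
            rcases List.mem_cons.mp hm with h | h
            · exact heq h
            · exact absurd (hlt.trans (hyhd _ h)) (lt_irrefl _)
          have h3 : (y :: ys).filter (fun p => !(decide (p.1 ∈ (x :: xs).map Prod.fst)))
              = (y :: ys).filter (fun p => !(decide (p.1 ∈ xs.map Prod.fst))) := by
            apply List.filter_congr
            intro p hp
            have hgt : y.1 ≤ p.1 := by
              rcases List.mem_cons.mp hp with h | h
              · exact h ▸ le_refl _
              · exact le_of_lt (hyhd p.1 (List.mem_map.mpr ⟨p, h, rfl⟩))
            have hk : p.1 ≠ x.1 := fun he => absurd (lt_of_lt_of_le hlt hgt) (he ▸ lt_irrefl _)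
            simp [List.map_cons, hk]
          rw [h3]
          simp [h1]
          ring
        · have hgt : y.1 < x.1 := lt_of_le_of_ne (not_lt.mp hlt) (fun h => heq h.symm)
          rw [show kmerMerge (x :: xs) (y :: ys) total = kmerMerge (x :: xs) ys (total + |y.2|) by
            rw [kmerMerge]; simp [heq, hlt]]
          rw [ihy (total + |y.2|) hx hy']
          have h2 : (x :: xs).map (fun p => |p.2 - lk (y :: ys) p.1|)
              = (x :: xs).map (fun p => |p.2 - lk ys p.1|) := by
            apply List.map_congr_left
            intro p hp
            have hge : x.1 ≤ p.1 := by
              rcases List.mem_cons.mp hp with h | h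
              · exact h ▸ le_refl _
              · exact le_of_lt (hxhd p.1 (List.mem_map.mpr ⟨p, h, rfl⟩))
            have hk : y.1 ≠ p.1 := fun he => absurd (lt_of_lt_of_le hgt hge) (he ▸ lt_irrefl _)
            rw [lk_cons, if_neg hk]
          have h3 : y.1 ∉ (x :: xs).map Prod.fst := by
            rw [List.map_cons]
            intro hm
            rcases List.mem_cons.mp hm with h | h
            · exact absurd (h ▸ hgt) (lt_irrefl _)
            · exact absurd (hgt.trans (hxhd _ h)) (lt_irrefl _)
          have hcond : (!decide (y.1 ∈ (x :: xs).map Prod.fst)) = true := by simpa using h3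
          rw [h2]
          rw [List.filter_cons, if_pos hcond]
          simp
          ring

-- first-match lookup is permutation-invariant on nodup-key lists
lemma lk_perm (l l' : List (String × Int)) (hp : l'.Perm l) (hn : (l.map Prod.fst).Nodup)
    (k : String) : lk l' k = lk l k := by
  have hn' : (l'.map Prod.fst).Nodup := ((hp.map Prod.fst).nodup_iff).mpr hn
  cases h : (PySem.Dict.mk l').get? k with
  | none =>
    have hnm : k ∉ (PySem.Dict.mk l').keys := (PySem.Dict.get?_eq_none_iff_not_mem_keys _ k).mp h
    have hnm2 : k ∉ l.map Prod.fst := fun hm =>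
      hnm ((hp.map Prod.fst).mem_iff.mpr hm)
    rw [lk, PySem.Dict.getD_eq_get?_getD, h, lk_not_mem l k hnm2]
    rfl
  | some v =>
    have hmem : (k, v) ∈ l' :=
      (PySem.Dict.get?_eq_some_iff_mem_items (PySem.Dict.mk l') k v hn').mp h
    have hmem2 : (k, v) ∈ l := hp.mem_iff.mp hmem
    have h2 : (PySem.Dict.mk l).get? k = some v :=
      (PySem.Dict.get?_eq_some_iff_mem_items (PySem.Dict.mk l) k v hn).mpr hmem2
    rw [lk, lk, PySem.Dict.getD_eq_get?_getD, PySem.Dict.getD_eq_get?_getD, h, h2]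

-- B computes the canonical value.
lemma B_char (data1 data2 : List (String × Int)) :
    kmerDistance_alt data1 data2 = kmerVal (PySem.Dict.ofList data1) (PySem.Dict.ofList data2) := by
  unfold kmerDistance_alt kmerVal
  simp only []
  set d1 := PySem.Dict.ofList data1 with hd1
  set d2 := PySem.Dict.ofList data2 with hd2
  have h1n : d1.keys.Nodup := PySem.Dict.nodup_keys_ofList data1
  have h2n : d2.keys.Nodup := PySem.Dict.nodup_keys_ofList data2
  set xs := PySem.List.sorted d1.items (fun p => p.1) with hxs
  set ys := PySem.List.sorted d2.items (fun p => p.1) with hys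
  have hpx : xs.Perm d1.items := PySem.List.sorted_perm d1.items _ false
  have hpy : ys.Perm d2.items := PySem.List.sorted_perm d2.items _ false
  have hk1 : d1.keys = d1.items.map Prod.fst := rfl
  have hk2 : d2.keys = d2.items.map Prod.fst := rfl
  have hnx : (xs.map Prod.fst).Nodup := ((hpx.map Prod.fst).nodup_iff).mpr (hk1 ▸ h1n)
  have hny : (ys.map Prod.fst).Nodup := ((hpy.map Prod.fst).nodup_iff).mpr (hk2 ▸ h2n)
  have hsx : (xs.map Prod.fst).Pairwise (· < ·) := by
    have hle : xs.Pairwise (fun a b => a.1 ≤ b.1) := PySem.List.sorted_pairwise d1.items _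
    have hne : xs.Pairwise (fun a b => a.1 ≠ b.1) := (List.pairwise_map).mp hnx
    rw [List.pairwise_map]
    exact (hle.and hne).imp (fun h => lt_of_le_of_ne h.1 h.2)
  have hsy : (ys.map Prod.fst).Pairwise (· < ·) := by
    have hle : ys.Pairwise (fun a b => a.1 ≤ b.1) := PySem.List.sorted_pairwise d2.items _
    have hne : ys.Pairwise (fun a b => a.1 ≠ b.1) := (List.pairwise_map).mp hny
    rw [List.pairwise_map]
    exact (hle.and hne).imp (fun h => lt_of_le_of_ne h.1 h.2)
  rw [merge_char xs ys 0 hsx hsy]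
  have hlkd : ∀ k, lk ys k = d2.getD k 0 := by
    intro k
    rw [lk_perm d2.items ys hpy (hk2 ▸ h2n) k]
    rfl
  have hsum1 : (xs.map (fun p => |p.2 - lk ys p.1|)).sum
      = (d1.items.map (fun p => |p.2 - d2.getD p.1 0|)).sum := by
    have h1 : xs.map (fun p => |p.2 - lk ys p.1|) = xs.map (fun p => |p.2 - d2.getD p.1 0|) :=
      List.map_congr_left (fun p _ => by rw [hlkd])
    rw [h1]
    exact (hpx.map _).sum_eq
  have hsum2 : ((ys.filter (fun p => !(decide (p.1 ∈ xs.map Prod.fst)))).map (fun p => |p.2|)).sum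
      = ((d2.items.filter (fun p => !(d1.contains p.1))).map (fun p => |p.2|)).sum := by
    have hc : ys.filter (fun p => !(decide (p.1 ∈ xs.map Prod.fst)))
        = ys.filter (fun p => !(d1.contains p.1)) := by
      apply List.filter_congr
      intro p _
      rw [PySem.Dict.contains_eq_decide_mem_keys]
      have : (p.1 ∈ xs.map Prod.fst) ↔ (p.1 ∈ d1.keys) := by
        rw [hk1]
        exact (hpx.map Prod.fst).mem_iff
      simp [this]
    rw [hc]
    exact ((hpy.filter _).map _).sum_eq
  rw [hsum1, hsum2]
  ring

-- ===== VERDICT (by name: the statement is the Claim_ definition above) =====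
theorem kmerDistance_spec : Claim_equal_kmerDistance := by
  intro data1 data2 _
  unfold Spec_kmerDistance
  rw [A_char, B_char]
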